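-- pv_equiv track=rewrite | github.com/DaNy3LiT0/Programacion_3 | Tp - Sarmiento-Ruiz/4_Funciones/En clase/Ejercicio_5.py | calificaciones
-- ===== SOURCE A (Python) =====
-- def calificaciones(x):
--     notas2 = []
--     for i in x:
--         if i >= 0 and i<6:
--             y = i
--             notas2.append(str(y) + ' - Desaprobado')
--         elif i>= 6 and i<=10:
--             y = i
--             notas2.append(str(y) + ' - Aprobado')
--         else:
--             return
--     return notas2
-- ===== SOURCE B (Python) =====
-- def calificaciones(x):
--     if not all(0 <= i <= 10 for i in x):
--         return
--     return [str(i) + (' - Aprobado' if i >= 6 else ' - Desaprobado') for i in x]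
-- ===== Notes on version B (the rewrite author's own statement) =====
-- stated objective: simpler
-- what changed: Replaces the interleaved validate-append-or-abort loop with two passes: an all() validity check and a single mapping comprehension.
import Mathlib
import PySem

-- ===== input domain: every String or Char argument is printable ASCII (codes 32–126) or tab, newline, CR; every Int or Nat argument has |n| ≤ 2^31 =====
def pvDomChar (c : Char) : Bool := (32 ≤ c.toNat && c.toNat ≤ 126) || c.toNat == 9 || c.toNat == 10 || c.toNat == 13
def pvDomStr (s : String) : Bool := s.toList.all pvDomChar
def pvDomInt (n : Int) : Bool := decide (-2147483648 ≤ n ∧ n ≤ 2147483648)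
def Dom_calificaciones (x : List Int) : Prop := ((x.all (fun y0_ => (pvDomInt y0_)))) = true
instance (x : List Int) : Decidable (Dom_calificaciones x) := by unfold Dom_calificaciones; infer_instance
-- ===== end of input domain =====

-- B replaces A's interleaved validate-append-or-abort loop with two passes (validate all, then map); objective: simpler.
-- ===== PORT A =====
def calificacionesLoop (l : List Int) (notas2 : List String) : Option (List String) :=
  match l with
  | [] => some notas2
  | i :: t =>
    if i ≥ 0 ∧ i < 6 then
      calificacionesLoop t (notas2 ++ [PySem.Int.toStr i ++ " - Desaprobado"])
    else if i ≥ 6 ∧ i ≤ 10 then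
      calificacionesLoop t (notas2 ++ [PySem.Int.toStr i ++ " - Aprobado"])
    else
      none

def calificaciones (x : List Int) : Option (List String) :=
  calificacionesLoop x []

-- ===== PORT B =====
def calificaciones_alt (x : List Int) : Option (List String) :=
  if x.all (fun i => decide (0 ≤ i ∧ i ≤ 10)) then
    some (x.map (fun i => PySem.Int.toStr i ++ (if i ≥ 6 then " - Aprobado" else " - Desaprobado")))
  else
    none

-- ===== PRECONDITION & SPEC =====
def Spec_calificaciones (x : List Int) (out : Option (List String)) : Prop := out = calificaciones_alt x
instance (x : List Int) (out : Option (List String)) : Decidable (Spec_calificaciones x out) := by unfold Spec_calificaciones; infer_instance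

-- ===== CLAIM (what is proved, stated in full; the proofs are below) =====
def Claim_equal_calificaciones : Prop := ∀ (x : List Int), Dom_calificaciones x → Spec_calificaciones x (calificaciones x)

-- ===== LEMMAS AND PROOFS =====

-- ===== VERDICT (by name: the statement is the Claim_ definition above) =====
lemma calificacionesLoop_char (l : List Int) (acc : List String) :
    calificacionesLoop l acc =
      if l.all (fun i => decide (0 ≤ i ∧ i ≤ 10)) then
        some (acc ++ l.map (fun i => PySem.Int.toStr i ++ (if i ≥ 6 then " - Aprobado" else " - Desaprobado")))
      else none := by
  induction l generalizing acc with
  | nil => simp [calificacionesLoop]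
  | cons i t ih =>
    simp only [calificacionesLoop, List.all_cons, List.map_cons]
    by_cases h1 : i ≥ 0 ∧ i < 6
    · rw [if_pos h1, ih]
      have hv : (0 ≤ i ∧ i ≤ 10) := ⟨h1.1, by omega⟩
      have h6 : ¬ i ≥ 6 := by omega
      simp [hv, h6]
    · by_cases h2 : i ≥ 6 ∧ i ≤ 10
      · rw [if_neg h1, if_pos h2, ih]
        have hv : (0 ≤ i ∧ i ≤ 10) := ⟨by omega, h2.2⟩
        simp [hv, h2.1]
      · rw [if_neg h1, if_neg h2]
        have : ¬ (0 ≤ i ∧ i ≤ 10) := by omega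
        simp [this]

-- ===== VERDICT =====
theorem calificaciones_spec : Claim_equal_calificaciones := by
  intro x _
  unfold Spec_calificaciones calificaciones calificaciones_alt
  rw [calificacionesLoop_char]
  simp
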